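-- pv_equiv track=rewrite | github.com/lilyqin7/PixelStitch | tester2.py | findNumSquaresToFill
-- ===== SOURCE A (Python) =====
-- def findNumSquaresToFill(board):
--     numSquares = 0
--     for row in board:
--         if 'blue' in row:
--             colStart = row.index('blue')
--             colEnd = colStart
--             row[colStart] = 0
--             if 'blue' in row:
--                 colEnd = row.index('blue')
--             for col in range(colStart + 1, colEnd):
--                 numSquares += 1
--     return numSquares
-- ===== SOURCE B (Python) =====
-- def findNumSquaresToFill(board):
--     total = 0
--     for row in board:
--         idxs = [i for i, v in enumerate(row) if v == 'blue']
--         if idxs: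
--             row[idxs[0]] = 0  # preserve A's in-place marking of the first blue cell
--         if len(idxs) >= 2:
--             total += idxs[1] - idxs[0] - 1
--     return total
-- ===== Notes on version B (the rewrite author's own statement) =====
-- stated objective: simpler
-- what changed: One enumerate pass per row collects all blue positions; the gap is the closed form idxs[1]-idxs[0]-1 instead of two .index scans over a mutated row plus a counting loop over the range.
import Mathlib
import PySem

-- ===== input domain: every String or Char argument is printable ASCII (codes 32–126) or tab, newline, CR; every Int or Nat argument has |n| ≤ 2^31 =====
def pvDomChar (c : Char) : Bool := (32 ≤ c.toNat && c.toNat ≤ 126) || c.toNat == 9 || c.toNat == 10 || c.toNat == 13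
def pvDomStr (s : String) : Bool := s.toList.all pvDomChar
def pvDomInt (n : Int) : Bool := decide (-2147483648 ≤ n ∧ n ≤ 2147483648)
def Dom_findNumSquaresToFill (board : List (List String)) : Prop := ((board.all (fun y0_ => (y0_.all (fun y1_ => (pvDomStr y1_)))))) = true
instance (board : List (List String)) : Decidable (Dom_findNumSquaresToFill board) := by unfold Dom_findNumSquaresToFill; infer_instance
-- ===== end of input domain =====

-- B replaces A's two .index scans over a mutated row and a counting loop by one enumerate
-- pass collecting the blue positions and the closed-form gap idxs[1]-idxs[0]-1 (objective: simpler).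
-- Both Pythons mutate each blue-containing row in place (first blue cell := 0) identically;
-- the equivalence proved here is about the return value.

-- ===== PORT A =====
def findNumSquaresToFill (board : List (List String)) : Int :=
  board.foldl (fun numSquares row =>
    if "blue" ∈ row then
      let colStart : Nat := (PySem.List.index? row "blue").getD 0
      -- Python writes the int 0 into the cell; any non-"blue" value is exact for the
      -- subsequent search, the port writes "" (only the return value is at stake)
      let row' := row.set colStart ""
      let colEnd : Int :=
        if "blue" ∈ row' then ((PySem.List.index? row' "blue").getD 0 : Nat) else (colStart : Int)
      (PySem.List.pyRange ((colStart : Int) + 1) colEnd 1).foldl (fun n _ => n + 1) numSquares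
    else numSquares) 0

-- ===== PORT B =====
def findNumSquaresToFill_alt (board : List (List String)) : Int :=
  board.foldl (fun total row =>
    let idxs := ((PySem.List.enumerate row 0).filter (fun p => p.2 == "blue")).map (·.1)
    -- (the Python writes 0 into row[idxs[0]] when idxs is non-empty; a side effect only)
    match idxs with
    | a :: b :: _ => total + (b - a - 1)
    | _ => total) 0

-- ===== PRECONDITION & SPEC =====
def Spec_findNumSquaresToFill (board : List (List String)) (out : Int) : Prop := out = findNumSquaresToFill_alt board
instance (board : List (List String)) (out : Int) : Decidable (Spec_findNumSquaresToFill board out) := by unfold Spec_findNumSquaresToFill; infer_instance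

-- ===== CLAIM (what is proved, stated in full; the proofs are below) =====
def Claim_equal_findNumSquaresToFill : Prop := ∀ (board : List (List String)), Dom_findNumSquaresToFill board → Spec_findNumSquaresToFill board (findNumSquaresToFill board)

-- ===== LEMMAS AND PROOFS =====

-- A's per-row contribution, flattened
def aRow (row : List String) : Int :=
  if "blue" ∈ row then
    ((PySem.List.pyRange ((((PySem.List.index? row "blue").getD 0 : Nat) : Int) + 1)
       (if "blue" ∈ row.set ((PySem.List.index? row "blue").getD 0) "" then
          (((PySem.List.index? (row.set ((PySem.List.index? row "blue").getD 0) "") "blue").getD 0 : Nat) : Int)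
        else (((PySem.List.index? row "blue").getD 0 : Nat) : Int))
       1).length : Int)
  else 0

-- B's per-row blue-index list and contribution
def blueIdxs (row : List String) (s : Int) : List Int :=
  ((PySem.List.enumerate row s).filter (fun p => p.2 == "blue")).map (·.1)

def bRow (row : List String) : Int :=
  match blueIdxs row 0 with
  | a :: b :: _ => b - a - 1
  | _ => 0

theorem foldl_count (l : List Int) (acc : Int) :
    l.foldl (fun n _ => n + 1) acc = acc + l.length := by
  induction l generalizing acc with
  | nil => simp
  | cons x xs ih => simp [List.foldl, ih]; ring

theorem blueIdxs_nil (s : Int) : blueIdxs [] s = [] := by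
  simp [blueIdxs, PySem.List.enumerate_nil]

theorem blueIdxs_cons_blue (xs : List String) (s : Int) :
    blueIdxs ("blue" :: xs) s = s :: blueIdxs xs (s + 1) := by
  simp [blueIdxs, PySem.List.enumerate_cons]

theorem blueIdxs_cons_ne {x : String} (hx : x ≠ "blue") (xs : List String) (s : Int) :
    blueIdxs (x :: xs) s = blueIdxs xs (s + 1) := by
  have hxb : (x == "blue") = false := by simpa using hx
  simp [blueIdxs, PySem.List.enumerate_cons, hxb]

theorem blueIdxs_shift (xs : List String) (s : Int) :
    blueIdxs xs s = (blueIdxs xs 0).map (· + s) := by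
  induction xs generalizing s with
  | nil => simp [blueIdxs_nil]
  | cons y ys ih =>
    by_cases hy : y = "blue"
    · subst hy
      rw [blueIdxs_cons_blue, blueIdxs_cons_blue]
      simp only [zero_add]
      rw [ih (s + 1), ih 1]
      simp only [List.map_cons, List.map_map]
      refine congrArg₂ _ (by ring) ?_
      exact List.map_congr_left fun a _ => by simp [Function.comp]; ring
    · rw [blueIdxs_cons_ne hy, blueIdxs_cons_ne hy]
      simp only [zero_add]
      rw [ih (s + 1), ih 1]
      simp only [List.map_map]
      exact List.map_congr_left fun a _ => by simp [Function.comp]; ring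

theorem blueIdxs_head? (xs : List String) (s : Int) :
    (blueIdxs xs s).head? = (PySem.List.index? xs "blue").map (fun k => s + (k : Int)) := by
  induction xs generalizing s with
  | nil =>
    rw [blueIdxs_nil, (PySem.List.index?_eq_none_iff [] "blue").mpr (by simp)]
    rfl
  | cons y ys ih =>
    by_cases hy : y = "blue"
    · subst hy
      rw [blueIdxs_cons_blue, PySem.List.index?_cons_self]
      simp
    · rw [blueIdxs_cons_ne hy, PySem.List.index?_cons_of_ne ys hy, ih (s + 1)]
      cases h : PySem.List.index? ys "blue" with
      | none => rfl
      | some k => simp; ring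

theorem row_eq (row : List String) : aRow row = bRow row := by
  induction row with
  | nil => simp [aRow, bRow, blueIdxs_nil]
  | cons x xs ih =>
    by_cases hx : x = "blue"
    · subst hx
      have hmem : "blue" ∈ ("blue" :: xs) := List.mem_cons_self ..
      have hne : ("" : String) ≠ "blue" := by decide
      by_cases h2 : "blue" ∈ xs
      · obtain ⟨k, hk⟩ := Option.isSome_iff_exists.mp
          ((PySem.List.index?_isSome_iff xs "blue").mpr h2)
        have hidx' : PySem.List.index? ("" :: xs) "blue" = some (k + 1) := by
          rw [PySem.List.index?_cons_of_ne xs hne, hk]; rfl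
        have hhead := blueIdxs_head? xs 1
        rw [hk] at hhead
        obtain ⟨t, ht⟩ : ∃ t, blueIdxs xs 1 = (1 + (k : Int)) :: t := by
          cases hl : blueIdxs xs 1 with
          | nil => rw [hl] at hhead; simp at hhead
          | cons a t =>
            rw [hl] at hhead; simp at hhead
            exact ⟨t, by rw [hhead]⟩
        have hmem'' : "blue" ∈ ("" :: xs) := List.mem_cons_of_mem _ h2
        simp only [aRow, bRow, if_pos hmem, PySem.List.index?_cons_self, Option.getD_some,
          List.set_cons_zero, if_pos hmem'', hidx', blueIdxs_cons_blue, zero_add, ht]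
        rw [PySem.List.length_pyRange_one]
        push_cast; omega
      · have hnone : PySem.List.index? xs "blue" = none :=
          (PySem.List.index?_eq_none_iff xs "blue").mpr h2
        have hhead := blueIdxs_head? xs 1
        rw [hnone] at hhead
        have hnil : blueIdxs xs 1 = [] := by
          cases hl : blueIdxs xs 1 with
          | nil => rfl
          | cons a t => rw [hl] at hhead; simp at hhead
        have hnmem : "blue" ∉ ("" :: xs) := by
          simp [List.mem_cons, h2, Ne.symm hne]
        simp only [aRow, bRow, if_pos hmem, PySem.List.index?_cons_self, Option.getD_some,
          List.set_cons_zero, if_neg hnmem, blueIdxs_cons_blue, zero_add, hnil]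
        simp [PySem.List.pyRange_one_eq_nil]
    · have hb : bRow (x :: xs) = bRow xs := by
        unfold bRow
        rw [blueIdxs_cons_ne hx, zero_add, blueIdxs_shift xs 1]
        cases blueIdxs xs 0 with
        | nil => rfl
        | cons a t =>
          cases t with
          | nil => rfl
          | cons b t' => simp
      have ha : aRow (x :: xs) = aRow xs := by
        by_cases h2 : "blue" ∈ xs
        · obtain ⟨k, hk⟩ := Option.isSome_iff_exists.mp
            ((PySem.List.index?_isSome_iff xs "blue").mpr h2)
          have hmem : "blue" ∈ (x :: xs) := List.mem_cons_of_mem _ h2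
          have hidx : PySem.List.index? (x :: xs) "blue" = some (k + 1) := by
            rw [PySem.List.index?_cons_of_ne xs hx, hk]; rfl
          have hset : (x :: xs).set (k + 1) ("" : String) = x :: xs.set k "" := rfl
          have hmem' : ("blue" ∈ x :: xs.set k "") ↔ ("blue" ∈ xs.set k "") := by
            simp [List.mem_cons, Ne.symm hx]
          by_cases h3 : "blue" ∈ xs.set k ""
          · obtain ⟨m, hm⟩ := Option.isSome_iff_exists.mp
              ((PySem.List.index?_isSome_iff (xs.set k "") "blue").mpr h3)
            have hidx3 : PySem.List.index? (x :: xs.set k "") "blue" = some (m + 1) := by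
              rw [PySem.List.index?_cons_of_ne _ hx, hm]; rfl
            simp only [aRow, if_pos hmem, if_pos h2, hidx, hk, Option.getD_some, hset,
              if_pos (hmem'.mpr h3), if_pos h3, hidx3, hm]
            rw [PySem.List.length_pyRange_one, PySem.List.length_pyRange_one]
            push_cast; omega
          · simp only [aRow, if_pos hmem, if_pos h2, hidx, hk, Option.getD_some, hset,
              if_neg (fun hc => h3 (hmem'.mp hc)), if_neg h3]
            rw [PySem.List.length_pyRange_one, PySem.List.length_pyRange_one]
            push_cast; omega
        · have hnmem : "blue" ∉ (x :: xs) := by simp [List.mem_cons, Ne.symm hx, h2]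
          simp [aRow, hnmem, h2]
      rw [ha, hb, ih]

theorem stepA_add (acc : Int) (row : List String) :
    (if "blue" ∈ row then
      let colStart : Nat := (PySem.List.index? row "blue").getD 0
      let row' := row.set colStart ""
      let colEnd : Int :=
        if "blue" ∈ row' then ((PySem.List.index? row' "blue").getD 0 : Nat) else (colStart : Int)
      (PySem.List.pyRange ((colStart : Int) + 1) colEnd 1).foldl (fun n _ => n + 1) acc
    else acc) = acc + aRow row := by
  by_cases h : "blue" ∈ row
  · simp only [if_pos h, aRow, foldl_count]
  · simp [if_neg h, aRow]

theorem stepB_add (acc : Int) (row : List String) :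
    (match blueIdxs row 0 with
     | a :: b :: _ => acc + (b - a - 1)
     | _ => acc) = acc + bRow row := by
  unfold bRow
  cases blueIdxs row 0 with
  | nil => simp
  | cons a t => cases t <;> simp

theorem fold_eq (board : List (List String)) (acc : Int) :
    board.foldl (fun numSquares row =>
      if "blue" ∈ row then
        let colStart : Nat := (PySem.List.index? row "blue").getD 0
        let row' := row.set colStart ""
        let colEnd : Int :=
          if "blue" ∈ row' then ((PySem.List.index? row' "blue").getD 0 : Nat) else (colStart : Int)
        (PySem.List.pyRange ((colStart : Int) + 1) colEnd 1).foldl (fun n _ => n + 1) numSquares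
      else numSquares) acc
    = board.foldl (fun total row =>
        let idxs := ((PySem.List.enumerate row 0).filter (fun p => p.2 == "blue")).map (·.1)
        match idxs with
        | a :: b :: _ => total + (b - a - 1)
        | _ => total) acc := by
  induction board generalizing acc with
  | nil => rfl
  | cons row rest ih =>
    simp only [List.foldl_cons]
    rw [ih]
    congr 1
    calc (if "blue" ∈ row then
            let colStart : Nat := (PySem.List.index? row "blue").getD 0
            let row' := row.set colStart ""
            let colEnd : Int :=
              if "blue" ∈ row' then ((PySem.List.index? row' "blue").getD 0 : Nat) else (colStart : Int)
            (PySem.List.pyRange ((colStart : Int) + 1) colEnd 1).foldl (fun n _ => n + 1) acc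
          else acc)
        = acc + aRow row := stepA_add acc row
      _ = acc + bRow row := by rw [row_eq]
      _ = (match blueIdxs row 0 with
           | a :: b :: _ => acc + (b - a - 1)
           | _ => acc) := (stepB_add acc row).symm

-- ===== VERDICT (by name: the statement is the Claim_ definition above) =====
theorem findNumSquaresToFill_spec : Claim_equal_findNumSquaresToFill := by
  intro board _
  unfold Spec_findNumSquaresToFill findNumSquaresToFill findNumSquaresToFill_alt
  exact fold_eq board 0
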